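-- pv_equiv track=rewrite | github.com/pr-poehali-dev/web-app-creation-1 | backend/url-upload/index.py | extract_best_vk_photo_url
-- ===== SOURCE A (Python) =====
-- def extract_best_vk_photo_url(photo_obj: dict) -> str:
--     '''Извлекает URL фото максимального размера из объекта VK photo'''
--     sizes = photo_obj.get('sizes', [])
--     if not sizes:
--         return photo_obj.get('url', '')
--
--     size_priority = ['w', 'z', 'y', 'x', 'r', 'q', 'p', 'o', 'm', 's']
--     size_map = {s['type']: s['url'] for s in sizes}
--
--     for size_type in size_priority:
--         if size_type in size_map:
--             return size_map[size_type]
--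
--     max_size = max(sizes, key=lambda s: s.get('width', 0) * s.get('height', 0))
--     return max_size.get('url', '')
-- ===== SOURCE B (Python) =====
-- def extract_best_vk_photo_url(photo_obj: dict) -> str:
--     '''Извлекает URL фото максимального размера из объекта VK photo'''
--     sizes = photo_obj.get('sizes', [])
--     if not sizes:
--         return photo_obj.get('url', '')
--
--     rank = {'w': 0, 'z': 1, 'y': 2, 'x': 3, 'r': 4,
--             'q': 5, 'p': 6, 'o': 7, 'm': 8, 's': 9}
--     best = None  # (rank, url) of the best-priority size seen so far
--     for s in sizes:
--         t, u = s['type'], s['url']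
--         r = rank.get(t)
--         if r is not None and (best is None or r <= best[0]):
--             best = (r, u)
--     if best is not None:
--         return best[1]
--
--     max_size = max(sizes, key=lambda s: s.get('width', 0) * s.get('height', 0))
--     return max_size.get('url', '')
-- ===== Notes on version B (the rewrite author's own statement) =====
-- stated objective: simpler
-- what changed: Replaces the {type:url} dict comprehension plus a separate 10-step priority scan by one pass over sizes with a precomputed rank table, tracking the best (lowest-rank, last-on-tie) candidate; the area-max fallback and empty-sizes return are kept.
-- outside the precondition, e.g. on extract_best_vk_photo_url({'url': []}): A returns [], B returns []
import Mathlib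
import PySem

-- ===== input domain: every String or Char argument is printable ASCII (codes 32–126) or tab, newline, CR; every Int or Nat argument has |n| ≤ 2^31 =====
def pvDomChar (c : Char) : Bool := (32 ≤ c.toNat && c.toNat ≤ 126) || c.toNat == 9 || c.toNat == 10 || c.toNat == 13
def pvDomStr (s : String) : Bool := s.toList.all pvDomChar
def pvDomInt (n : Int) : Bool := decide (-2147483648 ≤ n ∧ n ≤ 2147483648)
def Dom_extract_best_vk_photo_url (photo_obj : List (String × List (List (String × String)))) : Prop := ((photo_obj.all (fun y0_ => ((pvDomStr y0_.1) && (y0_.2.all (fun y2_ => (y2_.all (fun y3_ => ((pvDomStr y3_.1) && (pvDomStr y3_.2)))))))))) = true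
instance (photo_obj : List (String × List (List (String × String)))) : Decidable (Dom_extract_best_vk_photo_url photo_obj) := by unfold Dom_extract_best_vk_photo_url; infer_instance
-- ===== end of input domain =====

-- B replaces A's {type:url} dict + separate priority scan by one pass with a rank table (objective: simpler).

-- ===== PORT A =====
-- size_priority literal of A
def pvPrio : List String := ["w", "z", "y", "x", "r", "q", "p", "o", "m", "s"]

-- s.get('width', 0) * s.get('height', 0) where values are strings: both missing → int 0;
-- exactly one present → 0 * str = "" (string repetition); both present → str * str raises TypeError (none).
-- Exact on the stated domain (string-valued size dicts, as the type convention fixes).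
def pvAreaKey (s : List (String × String)) : Option (Int ⊕ String) :=
  match (PySem.Dict.mk s).get? "width", (PySem.Dict.mk s).get? "height" with
  | none, none => some (Sum.inl 0)
  | some _, none => some (Sum.inr "")
  | none, some _ => some (Sum.inr "")
  | some _, some _ => none

-- Python's '>' between the two key values: int/int and str/str compare, int/str raises TypeError (none).
def pvKeyGt : (Int ⊕ String) → (Int ⊕ String) → Option Bool
  | Sum.inl a, Sum.inl b => some (decide (b < a))
  | Sum.inr a, Sum.inr b => some (decide (b < a))
  | _, _ => none

-- max(sizes, key=lambda s: s.get('width',0)*s.get('height',0)): first extremal kept, none = raise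
def pvMaxArea (sizes : List (List (String × String))) : Option (List (String × String)) :=
  match sizes with
  | [] => none
  | s0 :: rest =>
    (rest.foldl
      (fun (acc : Option ((List (String × String)) × (Int ⊕ String))) s =>
        match acc with
        | none => none
        | some (best, bk) =>
          match pvAreaKey s with
          | none => none
          | some k =>
            match pvKeyGt k bk with
            | none => none
            | some true => some (s, k)
            | some false => some (best, bk))
      ((pvAreaKey s0).map (fun k => (s0, k)))).map (·.1)

-- one step of the dict comprehension {s['type']: s['url'] for s in sizes}
-- (s['type'] / s['url'] raise on a missing key in Python; Pre_ guarantees presence, getD "" is exact there)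
def pvIns (m : PySem.Dict String String) (s : List (String × String)) : PySem.Dict String String :=
  m.insert (((PySem.Dict.mk s).get? "type").getD "") (((PySem.Dict.mk s).get? "url").getD "")

def extract_best_vk_photo_url (photo_obj : List (String × List (List (String × String)))) : String :=
  let sizes := ((PySem.Dict.mk photo_obj).get? "sizes").getD []
  if sizes.isEmpty then
    ""  -- photo_obj.get('url', ''): Pre_ excludes a present 'url' key here (its value is a list, not a str)
  else
    let size_map := sizes.foldl pvIns PySem.Dict.empty
    match pvPrio.find? (fun t => size_map.contains t) with
    | some t => (size_map.get? t).getD ""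
    | none =>
      match pvMaxArea sizes with
      | some best => ((PySem.Dict.mk best).get? "url").getD ""
      | none => ""  -- unreachable: sizes nonempty

-- ===== PORT B =====
-- the rank table of Source B
def pvRankD : PySem.Dict String Int :=
  PySem.Dict.mk [("w", 0), ("z", 1), ("y", 2), ("x", 3), ("r", 4),
                 ("q", 5), ("p", 6), ("o", 7), ("m", 8), ("s", 9)]

-- one loop iteration of Source B: best = (rank, url), replaced when r <= best[0] (ties go to the later size)
def pvBStep (acc : Option (Int × String)) (s : List (String × String)) : Option (Int × String) :=
  let t := ((PySem.Dict.mk s).get? "type").getD ""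
  let u := ((PySem.Dict.mk s).get? "url").getD ""
  match pvRankD.get? t with
  | none => acc
  | some r =>
    match acc with
    | none => some (r, u)
    | some (br, bu) => if r ≤ br then some (r, u) else some (br, bu)

def extract_best_vk_photo_url_alt (photo_obj : List (String × List (List (String × String)))) : String :=
  let sizes := ((PySem.Dict.mk photo_obj).get? "sizes").getD []
  if sizes.isEmpty then
    ""  -- photo_obj.get('url', ''): same remark as in A's port
  else
    match sizes.foldl pvBStep none with
    | some (_, bu) => bu
    | none =>
      match pvMaxArea sizes with
      | some best => ((PySem.Dict.mk best).get? "url").getD ""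
      | none => ""

-- ===== PRECONDITION & SPEC =====
-- Pre_ excludes exactly: (a) empty sizes with a 'url' key present (A returns that list value, not a str;
-- B returns the same list — outside the declared return type, see the cite); (b) nonempty sizes where some
-- size lacks 'type' or 'url' (KeyError in both); (c) nonempty sizes with no priority type where the
-- width/height presence pattern is non-uniform or some size has both (TypeError in both programs' max call).
def Pre_extract_best_vk_photo_url (photo_obj : List (String × List (List (String × String)))) : Prop :=
  let sizes := ((PySem.Dict.mk photo_obj).get? "sizes").getD []
  if sizes.isEmpty then
    (PySem.Dict.mk photo_obj).get? "url" = none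
  else
    (∀ s ∈ sizes, ((PySem.Dict.mk s).get? "type").isSome ∧ ((PySem.Dict.mk s).get? "url").isSome) ∧
    ((∃ s ∈ sizes, ((PySem.Dict.mk s).get? "type").getD "" ∈ pvPrio) ∨
     (∀ s ∈ sizes, (PySem.Dict.mk s).get? "width" = none ∧ (PySem.Dict.mk s).get? "height" = none) ∨
     (∀ s ∈ sizes, ((PySem.Dict.mk s).get? "width").isSome ≠ ((PySem.Dict.mk s).get? "height").isSome))

instance (photo_obj : List (String × List (List (String × String)))) : Decidable (Pre_extract_best_vk_photo_url photo_obj) := by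
  unfold Pre_extract_best_vk_photo_url; infer_instance

def pvWitness_extract_best_vk_photo_url : (List (String × List (List (String × String)))) :=
  [("sizes", [[("type", "x"), ("url", "http://a")], [("type", "w"), ("url", "http://b")]])]

def Spec_extract_best_vk_photo_url (photo_obj : List (String × List (List (String × String)))) (out : String) : Prop := out = extract_best_vk_photo_url_alt photo_obj
instance (photo_obj : List (String × List (List (String × String)))) (out : String) : Decidable (Spec_extract_best_vk_photo_url photo_obj out) := by unfold Spec_extract_best_vk_photo_url; infer_instance

-- ===== CLAIM (what is proved, stated in full; the proofs are below) =====
def Claim_equal_extract_best_vk_photo_url : Prop := ∀ (photo_obj : List (String × List (List (String × String)))), Dom_extract_best_vk_photo_url photo_obj → Pre_extract_best_vk_photo_url photo_obj → Spec_extract_best_vk_photo_url photo_obj (extract_best_vk_photo_url photo_obj)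

-- ===== LEMMAS AND PROOFS =====

-- the invariant linking A's growing dict with B's running best candidate
def pvInv (m : PySem.Dict String String) (acc : Option (Int × String)) : Prop :=
  match acc with
  | none => pvPrio.find? (fun t => m.contains t) = none
  | some (r, u) => ∃ t, pvPrio.find? (fun t => m.contains t) = some t ∧
      pvRankD.get? t = some r ∧ m.get? t = some u

lemma pvRank_mem_isSome (t : String) (h : t ∈ pvPrio) : (pvRankD.get? t).isSome := by
  fin_cases h <;> decide

lemma pvRank_idx (t : String) (r : Int) (h : pvRankD.get? t = some r) :
    t ∈ pvPrio ∧ (pvPrio.idxOf t : Int) = r := by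
  simp only [pvRankD, PySem.Dict.get?_mk_cons] at h
  split_ifs at h with h1 h2 h3 h4 h5 h6 h7 h8 h9 h10
  · obtain rfl := (beq_iff_eq.mp h1).symm; injection h with h; subst h; exact ⟨by decide, by decide⟩
  · obtain rfl := (beq_iff_eq.mp h2).symm; injection h with h; subst h; exact ⟨by decide, by decide⟩
  · obtain rfl := (beq_iff_eq.mp h3).symm; injection h with h; subst h; exact ⟨by decide, by decide⟩
  · obtain rfl := (beq_iff_eq.mp h4).symm; injection h with h; subst h; exact ⟨by decide, by decide⟩
  · obtain rfl := (beq_iff_eq.mp h5).symm; injection h with h; subst h; exact ⟨by decide, by decide⟩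
  · obtain rfl := (beq_iff_eq.mp h6).symm; injection h with h; subst h; exact ⟨by decide, by decide⟩
  · obtain rfl := (beq_iff_eq.mp h7).symm; injection h with h; subst h; exact ⟨by decide, by decide⟩
  · obtain rfl := (beq_iff_eq.mp h8).symm; injection h with h; subst h; exact ⟨by decide, by decide⟩
  · obtain rfl := (beq_iff_eq.mp h9).symm; injection h with h; subst h; exact ⟨by decide, by decide⟩
  · obtain rfl := (beq_iff_eq.mp h10).symm; injection h with h; subst h; exact ⟨by decide, by decide⟩
  · simp [PySem.Dict.get?] at h

lemma pvFind_congr {α : Type} (l : List α) (p q : α → Bool) (h : ∀ x ∈ l, p x = q x) :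
    l.find? p = l.find? q := by
  induction l with
  | nil => rfl
  | cons a l ih =>
    rw [List.find?_cons, List.find?_cons, h a (by simp)]
    cases q a
    · exact ih (fun x hx => h x (by simp [hx]))
    · rfl

lemma pvFind_step_none (P : List String) (cont : String → Bool) (t0 : String)
    (h0 : t0 ∈ P) (h : P.find? cont = none) :
    P.find? (fun t => t == t0 || cont t) = some t0 := by
  induction P with
  | nil => simp at h0
  | cons p P ih =>
    have hall := List.find?_eq_none.mp h
    have hcp : ¬ cont p = true := hall p (by simp)
    have hP : P.find? cont = none := List.find?_eq_none.mpr (fun x hx => hall x (by simp [hx]))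
    by_cases hp : p = t0
    · rw [List.find?_cons_of_pos (by simp [hp])]
      rw [hp]
    · have ht0 : t0 ∈ P := by
        rcases List.mem_cons.mp h0 with h' | h'
        · exact absurd h'.symm hp
        · exact h'
      rw [List.find?_cons_of_neg (by simp [hp, hcp])]
      exact ih ht0 hP

lemma pvFind_step_some (P : List String) (cont : String → Bool) (t0 tb : String)
    (h0 : t0 ∈ P) (h : P.find? cont = some tb) :
    P.find? (fun t => t == t0 || cont t) =
      some (if P.idxOf t0 ≤ P.idxOf tb then t0 else tb) := by
  induction P with
  | nil => simp at h0
  | cons p P ih =>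
    by_cases hp : p = t0
    · subst hp
      rw [List.find?_cons_of_pos (by simp)]
      simp [List.idxOf_cons_self]
    · have ht0 : t0 ∈ P := by
        rcases List.mem_cons.mp h0 with h' | h'
        · exact absurd h'.symm hp
        · exact h'
      cases hc : cont p with
      | true =>
        rw [List.find?_cons_of_pos hc] at h
        injection h with h; subst h
        rw [List.find?_cons_of_pos (by simp [hc])]
        rw [List.idxOf_cons_self, List.idxOf_cons_ne _ (by exact hp)]
        simp
      | false =>
        rw [List.find?_cons_of_neg (by simp [hc])] at h
        have htb : tb ∈ P := List.mem_of_find?_eq_some h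
        have hpb : p ≠ tb := by
          intro he; subst he
          have := List.find?_some h
          simp [this] at hc
        rw [List.find?_cons_of_neg (by simp [hp, hc])]
        rw [ih ht0 h]
        rw [List.idxOf_cons_ne _ (by exact hp), List.idxOf_cons_ne _ (by exact hpb)]
        by_cases hle : P.idxOf t0 ≤ P.idxOf tb <;> simp [hle]

lemma pvInv_step (m : PySem.Dict String String) (acc : Option (Int × String))
    (s : List (String × String)) (h : pvInv m acc) :
    pvInv (pvIns m s) (pvBStep acc s) := by
  set t0 := ((PySem.Dict.mk s).get? "type").getD "" with ht0
  set u0 := ((PySem.Dict.mk s).get? "url").getD "" with hu0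
  have hcont : ∀ t : String, (pvIns m s).contains t = (t == t0 || m.contains t) := by
    intro t; simp [pvIns, PySem.Dict.contains_insert, ← ht0, ← hu0]
  cases hr : pvRankD.get? t0 with
  | none =>
    have hnm : t0 ∉ pvPrio := fun hmem => by
      have := pvRank_mem_isSome t0 hmem; rw [hr] at this; simp at this
    have hfind : pvPrio.find? (fun t => (pvIns m s).contains t) =
        pvPrio.find? (fun t => m.contains t) := by
      apply pvFind_congr
      intro t htP
      rw [hcont t]
      have : t ≠ t0 := fun he => hnm (he ▸ htP)
      simp [this]
    have hstep : pvBStep acc s = acc := by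
      simp [pvBStep, ← ht0, hr]
    rw [hstep]
    cases acc with
    | none => simpa [pvInv, hfind] using h
    | some p =>
      obtain ⟨r, u⟩ := p
      obtain ⟨t, hf, hrk, hg⟩ := h
      refine ⟨t, by rw [hfind]; exact hf, hrk, ?_⟩
      have htP : t ∈ pvPrio := List.mem_of_find?_eq_some hf
      have : t ≠ t0 := fun he => hnm (he ▸ htP)
      rw [pvIns, PySem.Dict.get?_insert_of_ne _ _ this]
      exact hg
  | some r =>
    obtain ⟨hmem, hidx⟩ := pvRank_idx t0 r hr
    have hself : (pvIns m s).get? t0 = some u0 := by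
      rw [pvIns, ← ht0, ← hu0]; exact PySem.Dict.get?_insert_self _ _ _
    have hfc : pvPrio.find? (fun t => (pvIns m s).contains t) =
        pvPrio.find? (fun t => t == t0 || m.contains t) :=
      pvFind_congr _ _ _ (fun t _ => hcont t)
    cases acc with
    | none =>
      have hnone : pvPrio.find? (fun t => m.contains t) = none := h
      have hstep : pvBStep none s = some (r, u0) := by
        simp [pvBStep, ← ht0, ← hu0, hr]
      rw [hstep]
      exact ⟨t0, by rw [hfc]; exact pvFind_step_none _ _ _ hmem hnone, hr, hself⟩
    | some p =>
      obtain ⟨br, bu⟩ := p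
      obtain ⟨tb, hfb, hrb, hgb⟩ := h
      obtain ⟨hmemb, hidxb⟩ := pvRank_idx tb br hrb
      have hfs : pvPrio.find? (fun t => (pvIns m s).contains t) =
          some (if pvPrio.idxOf t0 ≤ pvPrio.idxOf tb then t0 else tb) := by
        rw [hfc]; exact pvFind_step_some _ _ _ _ hmem hfb
      have hstep : pvBStep (some (br, bu)) s =
          if r ≤ br then some (r, u0) else some (br, bu) := by
        simp [pvBStep, ← ht0, ← hu0, hr]
      rw [hstep]
      by_cases hle : r ≤ br
      · have hleN : pvPrio.idxOf t0 ≤ pvPrio.idxOf tb := by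
          have : (pvPrio.idxOf t0 : Int) ≤ (pvPrio.idxOf tb : Int) := by
            rw [hidx, hidxb]; exact hle
          exact_mod_cast this
        rw [if_pos hle]
        exact ⟨t0, by rw [hfs, if_pos hleN], hr, hself⟩
      · have hgt : ¬ pvPrio.idxOf t0 ≤ pvPrio.idxOf tb := by
          intro hc
          have : (pvPrio.idxOf t0 : Int) ≤ (pvPrio.idxOf tb : Int) := by exact_mod_cast hc
          rw [hidx, hidxb] at this; exact hle this
        have hne : tb ≠ t0 := by
          intro he; subst he; exact hgt le_rfl
        rw [if_neg hle]
        refine ⟨tb, by rw [hfs, if_neg hgt], hrb, ?_⟩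
        rw [pvIns, PySem.Dict.get?_insert_of_ne _ _ hne]
        exact hgb

lemma pvInv_foldl (sizes : List (List (String × String)))
    (m : PySem.Dict String String) (acc : Option (Int × String)) (h : pvInv m acc) :
    pvInv (sizes.foldl pvIns m) (sizes.foldl pvBStep acc) := by
  induction sizes generalizing m acc with
  | nil => exact h
  | cons s sizes ih => exact ih _ _ (pvInv_step m acc s h)

-- ===== VERDICT (by name: the statement is the Claim_ definition above) =====
theorem extract_best_vk_photo_url_spec : Claim_equal_extract_best_vk_photo_url := by
  intro photo_obj _ _
  unfold Spec_extract_best_vk_photo_url extract_best_vk_photo_url extract_best_vk_photo_url_alt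
  set sizes := ((PySem.Dict.mk photo_obj).get? "sizes").getD [] with hs
  by_cases he : sizes.isEmpty
  · simp [he]
  · simp only [he, Bool.false_eq_true, ite_false]
    have hinv : pvInv (sizes.foldl pvIns PySem.Dict.empty) (sizes.foldl pvBStep none) := by
      apply pvInv_foldl
      show pvPrio.find? (fun t => (PySem.Dict.empty (κ := String) (ν := String)).contains t) = none
      decide
    cases hb : sizes.foldl pvBStep none with
    | none =>
      rw [hb] at hinv
      have hn : pvPrio.find? (fun t => (sizes.foldl pvIns PySem.Dict.empty).contains t) = none := hinv
      rw [hn]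
    | some p =>
      obtain ⟨r, u⟩ := p
      rw [hb] at hinv
      have hinv' : ∃ t, pvPrio.find? (fun t => (sizes.foldl pvIns PySem.Dict.empty).contains t) = some t ∧
          pvRankD.get? t = some r ∧ (sizes.foldl pvIns PySem.Dict.empty).get? t = some u := hinv
      obtain ⟨t, hf, _, hg⟩ := hinv'
      rw [hf]
      show ((sizes.foldl pvIns PySem.Dict.empty).get? t).getD "" = u
      rw [hg]
      rfl
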